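-- pv_equiv track=rewrite | github.com/MartinaSide/Advent_Of_Code | 2023/challenge4.py | check_game_min
-- ===== SOURCE A (Python) =====
-- def min_balls(first_array, second_array):
--     c = first_array
--     if first_array[0] < second_array[0]:
--         c[0] = second_array[0]
--     if first_array[1] < second_array[1]:
--         c[1] = second_array[1]
--     if first_array[2] < second_array[2]:
--         c[2] = second_array[2]
--     return c
--
-- def check_game_min(input_string):
--     temp_parts = input_string.split(":")
--     parts = temp_parts[1].split(";")
--     b = [0, 0, 0]
--     # Loop through the elements in the parts array
--     for part in parts:
--         a = [0, 0, 0]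
--         temp_game = part.split(",")
--         for game in temp_game:
--             # Check if the last character in the element is "d", "n", or "e"
--             if game[-1] in ["d", "n", "e"]:
--                 numeral = remove_non_numeric(game)
--                 # Add the numeral to the corresponding position in the array
--                 if game[-1] == "d":
--                     a[0] += numeral
--                 elif game[-1] == "n":
--                     a[1] += numeral
--                 elif game[-1] == "e":
--                     a[2] += numeral
--         b = min_balls(b, a)
--     return b
--
-- def remove_non_numeric(string):
--     # Initialize an empty string to store the result
--     result = ""
--     # Loop through each character in the string
--     for char in string:
--         # Check if the character is a digit
--         if char.isdigit():
--             # Append the character to the result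
--             result += str(char)
--     # Return the result
--     return int(result)
-- ===== SOURCE B (Python) =====
-- def check_game_min(input_string):
--     # one parse pass builds the token lists; then each colour's answer is an
--     # independent max-of-sums over the parts (three comprehensions, no running
--     # triple and no element-wise max helper)
--     parts = [p.split(",") for p in input_string.split(":")[1].split(";")]
--
--     def numeral(token):
--         return int("".join(ch for ch in token if ch.isdigit()))
--
--     return [max(sum(numeral(g) for g in part if g[-1] == letter) for part in parts)
--             for letter in "dne"]
-- ===== Notes on version B (the rewrite author's own statement) =====
-- stated objective: alternative
-- what changed: Instead of folding a running [r,g,b] maximum via the mutating min_balls helper while accumulating an indexed triple per part, B parses the tokens once and then computes each colour independently as max over parts of the sum of that colour's numerals (three comprehensions, no triple accumulator and no element-wise max helper).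
import Mathlib
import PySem

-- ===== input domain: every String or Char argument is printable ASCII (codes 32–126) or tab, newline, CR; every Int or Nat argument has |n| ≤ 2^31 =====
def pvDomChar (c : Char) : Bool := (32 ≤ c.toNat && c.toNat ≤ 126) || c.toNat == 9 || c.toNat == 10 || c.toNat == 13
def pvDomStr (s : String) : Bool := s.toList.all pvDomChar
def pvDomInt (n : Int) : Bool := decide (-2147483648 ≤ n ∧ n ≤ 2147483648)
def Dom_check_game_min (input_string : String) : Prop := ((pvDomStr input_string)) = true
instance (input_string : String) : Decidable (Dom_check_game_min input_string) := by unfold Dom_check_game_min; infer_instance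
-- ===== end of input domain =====

-- B replaces A's running element-wise maximum (mutating min_balls) and per-part indexed triple
-- by three independent per-colour max-of-sums passes; equal return value on Pre_ (alternative decomposition, not faster).

-- ===== PORT A =====
-- min_balls mutates c (an alias of first_array) in place; indices 0,1,2 are distinct, so each
-- comparison reads the original element — reading the parameter here is exact. Lists are always
-- length 3 at the call site, so getD 0 is exact for the in-range Python indexing.
def min_balls (first_array second_array : List Int) : List Int :=
  let c := first_array
  let c := if first_array.getD 0 0 < second_array.getD 0 0 then c.set 0 (second_array.getD 0 0) else c
  let c := if first_array.getD 1 0 < second_array.getD 1 0 then c.set 1 (second_array.getD 1 0) else c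
  if first_array.getD 2 0 < second_array.getD 2 0 then c.set 2 (second_array.getD 2 0) else c

def remove_non_numeric (string : String) : Int :=
  let result := string.toList.foldl
    (fun result char => if PySem.Chars.isdigit char then result ++ [char] else result) ([] : List Char)
  -- int(result): ValueError (none) when no digit was collected — excluded by Pre_
  (PySem.Int.ofStr? (String.ofList result)).getD 0

-- loop body of `for game in temp_game`
def check_game_min_inner (a : List Int) (game : String) : List Int :=
  match PySem.Str.pyGet? game (-1) with  -- game[-1]: IndexError (none) on "" — excluded by Pre_
  | none => a
  | some last =>
    if last = 'd' ∨ last = 'n' ∨ last = 'e' then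
      let numeral := remove_non_numeric game
      if last = 'd' then a.set 0 (a.getD 0 0 + numeral)
      else if last = 'n' then a.set 1 (a.getD 1 0 + numeral)
      else a.set 2 (a.getD 2 0 + numeral)
    else a

def check_game_min (input_string : String) : List Int :=
  let temp_parts := (PySem.Str.split? input_string ":").getD []   -- sep ≠ "": always some
  -- temp_parts[1]: IndexError (none) when there is no ':' — excluded by Pre_
  let parts := (PySem.Str.split? ((PySem.List.pyGet? temp_parts 1).getD "") ";").getD []
  parts.foldl
    (fun b part =>
      let a : List Int := [0, 0, 0]
      let temp_game := (PySem.Str.split? part ",").getD []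
      let a := temp_game.foldl check_game_min_inner a
      min_balls b a)
    [0, 0, 0]

-- ===== PORT B =====
def pvNumeral (token : String) : Int :=
  -- int(...): ValueError (none) when no digit — excluded by Pre_
  (PySem.Int.ofStr? (String.ofList (token.toList.filter (fun ch => PySem.Chars.isdigit ch)))).getD 0

def check_game_min_alt (input_string : String) : List Int :=
  let parts := ((PySem.Str.split? ((PySem.List.pyGet? ((PySem.Str.split? input_string ":").getD []) 1).getD "") ";").getD []).map
    (fun p => (PySem.Str.split? p ",").getD [])
  (['d', 'n', 'e'] : List Char).map (fun letter =>
    -- max(sum(numeral(g) for g in part if g[-1] == letter) for part in parts)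
    (PySem.List.max?
      (parts.map (fun part =>
        ((part.filter (fun g => (PySem.Str.pyGet? g (-1)).getD '?' == letter)).map pvNumeral).sum))
      (fun y => y)).getD 0)   -- max(): ValueError unreachable (split never yields [])

-- ===== PRECONDITION & SPEC =====
-- Pre_ excludes exactly the inputs where A raises: no ':' (IndexError), an empty comma-token
-- (IndexError on game[-1]), or a token ending in d/n/e with no digit (ValueError in int()).
def Pre_check_game_min (input_string : String) : Prop :=
  2 ≤ ((PySem.Str.split? input_string ":").getD []).length ∧
  ∀ part ∈ (PySem.Str.split? ((PySem.List.pyGet? ((PySem.Str.split? input_string ":").getD []) 1).getD "") ";").getD [],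
    ∀ g ∈ (PySem.Str.split? part ",").getD [],
      g ≠ "" ∧ ((PySem.Str.pyGet? g (-1)).getD '?' ∈ (['d', 'n', 'e'] : List Char) →
                 g.toList.any (fun c => PySem.Chars.isdigit c) = true)
instance (input_string : String) : Decidable (Pre_check_game_min input_string) := by
  unfold Pre_check_game_min; infer_instance

def pvWitness_check_game_min : String := "Game 1: 3 red, 2 green; 1 blue"

def Spec_check_game_min (input_string : String) (out : List Int) : Prop := out = check_game_min_alt input_string
instance (input_string : String) (out : List Int) : Decidable (Spec_check_game_min input_string out) := by unfold Spec_check_game_min; infer_instance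

-- ===== CLAIM (what is proved, stated in full; the proofs are below) =====
def Claim_equal_check_game_min : Prop := ∀ (input_string : String), Dom_check_game_min input_string → Pre_check_game_min input_string → Spec_check_game_min input_string (check_game_min input_string)

-- ===== LEMMAS AND PROOFS =====

-- A's digit extraction equals B's filter-based one
lemma remove_non_numeric_eq (g : String) : remove_non_numeric g = pvNumeral g := by
  unfold remove_non_numeric pvNumeral
  rw [PySem.List.foldl_append_if_eq_filter]
  simp

-- per-part, per-colour sum of numerals (B's inner sum)
def pvS (letter : Char) (toks : List String) : Int :=
  ((toks.filter (fun g => (PySem.Str.pyGet? g (-1)).getD '?' == letter)).map pvNumeral).sum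

lemma inner_step (g : String) (x y z : Int) :
    check_game_min_inner [x, y, z] g =
      [x + (if (PySem.Str.pyGet? g (-1)).getD '?' == 'd' then pvNumeral g else 0),
       y + (if (PySem.Str.pyGet? g (-1)).getD '?' == 'n' then pvNumeral g else 0),
       z + (if (PySem.Str.pyGet? g (-1)).getD '?' == 'e' then pvNumeral g else 0)] := by
  unfold check_game_min_inner
  cases hg : PySem.Str.pyGet? g (-1) with
  | none => simp
  | some last =>
    by_cases hd : last = 'd'
    · simp [hd, remove_non_numeric_eq]
    · by_cases hn : last = 'n'
      · simp [hn, remove_non_numeric_eq]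
      · by_cases he : last = 'e'
        · simp [he, remove_non_numeric_eq]
        · simp [hd, hn, he]

lemma inner_eq (toks : List String) : ∀ x y z : Int,
    toks.foldl check_game_min_inner [x, y, z]
      = [x + pvS 'd' toks, y + pvS 'n' toks, z + pvS 'e' toks] := by
  induction toks with
  | nil => intro x y z; simp [pvS]
  | cons g toks ih =>
    intro x y z
    rw [List.foldl_cons, inner_step, ih]
    unfold pvS
    simp only [List.filter_cons]
    split_ifs <;> simp [List.cons.injEq] <;> omega

lemma min_balls_eq (bx by' bz ax ay az : Int) :
    min_balls [bx, by', bz] [ax, ay, az] = [max bx ax, max by' ay, max bz az] := by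
  unfold min_balls
  split_ifs <;> simp_all <;> omega

lemma outer_eq (parts : List String) : ∀ x y z : Int,
    parts.foldl
      (fun b part => min_balls b
        (((PySem.Str.split? part ",").getD []).foldl check_game_min_inner [0, 0, 0]))
      [x, y, z]
    = [(parts.map (fun p => pvS 'd' ((PySem.Str.split? p ",").getD []))).foldl max x,
       (parts.map (fun p => pvS 'n' ((PySem.Str.split? p ",").getD []))).foldl max y,
       (parts.map (fun p => pvS 'e' ((PySem.Str.split? p ",").getD []))).foldl max z] := by
  induction parts with
  | nil => intro x y z; simp
  | cons p parts ih =>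
    intro x y z
    rw [List.foldl_cons, inner_eq]
    simp only [zero_add]
    rw [min_balls_eq, ih]
    simp [List.foldl_cons]

lemma pvNumeral_nonneg_aux (o : Option Nat) :
    0 ≤ (Option.map (fun n => n) (o.bind fun a => pure ((a : Nat) : Int))).getD 0 := by
  cases o <;> simp

lemma ofChars?_nonneg (cs : List Char) (h : '-' ∉ cs) :
    0 ≤ (PySem.Int.ofChars? cs).getD 0 := by
  have hsub : ∀ c, c ∈ (List.dropWhile PySem.Int.isIntSpace
      (List.dropWhile PySem.Int.isIntSpace cs).reverse).reverse → c ∈ cs := by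
    intro c hc
    rw [List.mem_reverse] at hc
    have := (List.dropWhile_sublist _ (l := (List.dropWhile PySem.Int.isIntSpace cs).reverse)).mem hc
    rw [List.mem_reverse] at this
    exact (List.dropWhile_sublist _ (l := cs)).mem this
  simp only [PySem.Int.ofChars?]
  split
  · next ds heq =>
    exact absurd (hsub '-' (heq ▸ List.mem_cons_self)) h
  · next ds heq => exact pvNumeral_nonneg_aux _
  · next ds h1 h2 => exact pvNumeral_nonneg_aux _

lemma pvNumeral_nonneg (g : String) : 0 ≤ pvNumeral g := by
  unfold pvNumeral PySem.Int.ofStr?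
  apply ofChars?_nonneg
  intro hmem
  simp [List.mem_filter] at hmem
  exact absurd hmem.2 (by decide)

lemma pvS_nonneg (letter : Char) (toks : List String) : 0 ≤ pvS letter toks := by
  unfold pvS
  apply List.sum_nonneg
  intro x hx
  rcases List.mem_map.1 hx with ⟨g, _, rfl⟩
  exact pvNumeral_nonneg g

lemma maxD_eq_foldl (l : List Int) (h : ∀ x ∈ l, 0 ≤ x) :
    (PySem.List.max? l (fun y => y)).getD 0 = l.foldl max 0 := by
  cases l with
  | nil => rfl
  | cons x t =>
    rw [PySem.List.max?_id_cons]
    have hx : max 0 x = x := max_eq_right (h x List.mem_cons_self)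
    simp [hx]

lemma alt_coord (parts : List String) (letter : Char) :
    (PySem.List.max?
      ((parts.map (fun p => (PySem.Str.split? p ",").getD [])).map
        (fun part =>
          ((part.filter (fun g => (PySem.Str.pyGet? g (-1)).getD '?' == letter)).map pvNumeral).sum))
      (fun y => y)).getD 0
    = (parts.map (fun p => pvS letter ((PySem.Str.split? p ",").getD []))).foldl max 0 := by
  rw [List.map_map]
  rw [maxD_eq_foldl]
  · rfl
  · intro x hx
    rcases List.mem_map.1 hx with ⟨p, _, rfl⟩
    exact pvS_nonneg _ _

-- ===== VERDICT (by name: the statement is the Claim_ definition above) =====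
theorem check_game_min_spec : Claim_equal_check_game_min := by
  intro s _dom _pre
  show check_game_min s = check_game_min_alt s
  unfold check_game_min check_game_min_alt
  simp only []
  rw [outer_eq, List.map_cons, List.map_cons, List.map_cons, List.map_nil, alt_coord, alt_coord, alt_coord]
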